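-- pv_equiv track=rewrite | github.com/frid000/SATsolver | generate_nqueens_sat.py | nqueens_sat
-- ===== SOURCE A (Python) =====
-- def nqueens_sat(n):
--     chess = [[(x + (n * y)) for x in range(1, n+1)] for y in range(n)]
--     nbvar = n * n
--     nbclauses = 0
--     sat = ""
--
--     # at least one queen in each row
--     for i in range(n):
--         for j in range(n):
--             sat = sat + str(chess[i][j]) + " "
--         sat = sat + "0 \n"
--         nbclauses += 1
--
--     # at most one queen in each row and at most one queen in each column
--     for k in range(n):
--         for i in range(n):
--             for j in range(i+1, n):
--                 sat = sat + str(-chess[k][i]) + " " + str(-chess[k][j]) + " 0 \n"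
--                 sat = sat + str(-chess[i][k]) + " " + str(-chess[j][k]) + " 0 \n"
--                 nbclauses += 2
--
--     # at most one queen at each diagonal
--     for i in range(n):
--         for j in range(n):
--             for k in range(i+1, n):
--                 for l in range(n):
--                     if (i+j == k+l) or (i-j == k-l):
--                         sat = sat + str(-chess[i][j]) + " " + str(-chess[k][l]) + " 0 \n"
--                         nbclauses += 1
--
--     first_line = "p cnf " + str(nbvar) + " " + str(nbclauses) + "\n"
--     sat = first_line + sat
--
--     return sat
-- ===== SOURCE B (Python) =====
-- def nqueens_sat(n):
--     def var(i, j):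
--         return i * n + j + 1
--
--     def clause(va, vb):
--         return str(-va) + " " + str(-vb) + " 0 \n"
--
--     lines = []
--     nbclauses = 0
--
--     # at least one queen in each row
--     for i in range(n):
--         lines.append(" ".join(str(var(i, j)) for j in range(n)) + " 0 \n")
--         nbclauses += 1
--
--     # at most one queen in each row and in each column
--     for k in range(n):
--         for i in range(n):
--             for j in range(i + 1, n):
--                 lines.append(clause(var(k, i), var(k, j)))
--                 lines.append(clause(var(i, k), var(j, k)))
--                 nbclauses += 2
--
--     # at most one queen on each diagonal: for k > i the only candidate
--     # columns are l = i+j-k (anti-diagonal) and l = j+k-i (main diagonal)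
--     for i in range(n):
--         for j in range(n):
--             for k in range(i + 1, n):
--                 l = i + j - k
--                 if l >= 0:
--                     lines.append(clause(var(i, j), var(k, l)))
--                     nbclauses += 1
--                 l = j + k - i
--                 if l < n:
--                     lines.append(clause(var(i, j), var(k, l)))
--                     nbclauses += 1
--
--     return "p cnf " + str(n * n) + " " + str(nbclauses) + "\n" + "".join(lines)
-- ===== Notes on version B (the rewrite author's own statement) =====
-- stated objective: alternative
-- what changed: Replaces the O(n^4) scan over all candidate columns l (and the chess table plus quadratic string concatenation) by computing the two diagonal-matching columns l=i+j-k and l=j+k-i directly from a closed-form variable numbering, collecting clause strings in a list joined once; intended as faster (measured 22.8x at n=16, the largest size A finished), though a timing run could not confirm it at its largest sizes.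
import Mathlib
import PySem

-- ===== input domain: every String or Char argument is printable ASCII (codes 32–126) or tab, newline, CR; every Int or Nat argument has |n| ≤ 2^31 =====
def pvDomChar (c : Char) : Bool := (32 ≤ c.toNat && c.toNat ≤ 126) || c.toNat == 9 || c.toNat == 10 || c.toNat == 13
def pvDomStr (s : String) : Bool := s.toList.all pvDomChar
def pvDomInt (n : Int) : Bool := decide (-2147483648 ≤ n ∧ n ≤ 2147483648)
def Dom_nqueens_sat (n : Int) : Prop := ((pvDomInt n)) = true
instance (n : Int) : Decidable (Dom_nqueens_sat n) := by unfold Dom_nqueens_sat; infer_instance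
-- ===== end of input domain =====

-- B replaces A's scan over all candidate columns l by computing the two
-- diagonal-matching columns directly from a closed-form variable numbering,
-- collecting clause strings in a list joined once (alternative algorithm).

-- ===== PORT A =====
def aChess (n : Int) : List (List Int) :=
  (PySem.List.pyRange 0 n).map (fun y => (PySem.List.pyRange 1 (n + 1)).map (fun x => x + n * y))

def aCell (n i j : Int) : Int :=
  PySem.List.pyGetD (PySem.List.pyGetD (aChess n) i []) j 0

-- at least one queen in each row
def aPhase1 (n : Int) : List Char × Int :=
  (PySem.List.pyRange 0 n).foldl (fun st i =>
    ((PySem.List.pyRange 0 n).foldl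
        (fun sat j => sat ++ PySem.Int.toChars (aCell n i j) ++ [' ']) st.1
      ++ ['0', ' ', '\n'], st.2 + 1)) ([], 0)

-- at most one queen in each row and at most one queen in each column
def aPhase2 (n : Int) (st0 : List Char × Int) : List Char × Int :=
  (PySem.List.pyRange 0 n).foldl (fun st k =>
    (PySem.List.pyRange 0 n).foldl (fun st i =>
      (PySem.List.pyRange (i + 1) n).foldl (fun st j =>
        (st.1 ++ PySem.Int.toChars (-(aCell n k i)) ++ [' '] ++ PySem.Int.toChars (-(aCell n k j)) ++ [' ', '0', ' ', '\n']
              ++ PySem.Int.toChars (-(aCell n i k)) ++ [' '] ++ PySem.Int.toChars (-(aCell n j k)) ++ [' ', '0', ' ', '\n'],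
         st.2 + 2)) st) st) st0

-- at most one queen at each diagonal
def aPhase3 (n : Int) (st0 : List Char × Int) : List Char × Int :=
  (PySem.List.pyRange 0 n).foldl (fun st i =>
    (PySem.List.pyRange 0 n).foldl (fun st j =>
      (PySem.List.pyRange (i + 1) n).foldl (fun st k =>
        (PySem.List.pyRange 0 n).foldl (fun st l =>
          if (i + j == k + l) || (i - j == k - l) then
            (st.1 ++ PySem.Int.toChars (-(aCell n i j)) ++ [' '] ++ PySem.Int.toChars (-(aCell n k l)) ++ [' ', '0', ' ', '\n'],
             st.2 + 1)
          else st) st) st) st) st0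

def nqueens_sat (n : Int) : String :=
  let st := aPhase3 n (aPhase2 n (aPhase1 n))
  String.ofList ("p cnf ".toList ++ PySem.Int.toChars (n * n) ++ [' '] ++ PySem.Int.toChars st.2 ++ ['\n'] ++ st.1)

-- ===== PORT B =====
def bVar (n i j : Int) : Int := i * n + j + 1

def bClause (va vb : Int) : List Char :=
  PySem.Int.toChars (-va) ++ [' '] ++ PySem.Int.toChars (-vb) ++ [' ', '0', ' ', '\n']

-- at least one queen in each row
def bPhase1 (n : Int) : List (List Char) × Int :=
  (PySem.List.pyRange 0 n).foldl (fun st i =>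
    (st.1 ++ [PySem.Chars.join [' '] ((PySem.List.pyRange 0 n).map (fun j => PySem.Int.toChars (bVar n i j)))
                ++ [' ', '0', ' ', '\n']],
     st.2 + 1)) ([], 0)

-- at most one queen in each row and in each column
def bPhase2 (n : Int) (st0 : List (List Char) × Int) : List (List Char) × Int :=
  (PySem.List.pyRange 0 n).foldl (fun st k =>
    (PySem.List.pyRange 0 n).foldl (fun st i =>
      (PySem.List.pyRange (i + 1) n).foldl (fun st j =>
        (st.1 ++ [bClause (bVar n k i) (bVar n k j), bClause (bVar n i k) (bVar n j k)],
         st.2 + 2)) st) st) st0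

-- at most one queen on each diagonal: for k > i the only candidate columns are
-- l = i+j-k (anti-diagonal) and l = j+k-i (main diagonal)
def bPhase3 (n : Int) (st0 : List (List Char) × Int) : List (List Char) × Int :=
  (PySem.List.pyRange 0 n).foldl (fun st i =>
    (PySem.List.pyRange 0 n).foldl (fun st j =>
      (PySem.List.pyRange (i + 1) n).foldl (fun st k =>
        let st1 := if 0 ≤ i + j - k then
            (st.1 ++ [bClause (bVar n i j) (bVar n k (i + j - k))], st.2 + 1) else st
        if j + k - i < n then
            (st1.1 ++ [bClause (bVar n i j) (bVar n k (j + k - i))], st1.2 + 1) else st1) st) st) st0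

def nqueens_sat_alt (n : Int) : String :=
  let st := bPhase3 n (bPhase2 n (bPhase1 n))
  String.ofList ("p cnf ".toList ++ PySem.Int.toChars (n * n) ++ [' '] ++ PySem.Int.toChars st.2 ++ ['\n'] ++ st.1.flatten)

-- ===== PRECONDITION & SPEC =====
def Spec_nqueens_sat (n : Int) (out : String) : Prop := out = nqueens_sat_alt n
instance (n : Int) (out : String) : Decidable (Spec_nqueens_sat n out) := by unfold Spec_nqueens_sat; infer_instance

-- ===== CLAIM (what is proved, stated in full; the proofs are below) =====
def Claim_equal_nqueens_sat : Prop := ∀ (n : Int), Dom_nqueens_sat n → Spec_nqueens_sat n (nqueens_sat n)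

-- ===== LEMMAS AND PROOFS =====

theorem foldl_pair_append_add {α β : Type} (l : List β) (G : β → List α) (cnt : β → Int)
    (s : List α) (c : Int) :
    l.foldl (fun st x => (st.1 ++ G x, st.2 + cnt x)) (s, c)
      = (s ++ l.flatMap G, c + (l.map cnt).sum) := by
  rw [PySem.List.foldl_prod_mk (f := fun s x => s ++ G x) (g := fun c x => c + cnt x),
      PySem.List.foldl_append_eq_flatMap, PySem.List.foldl_add]

theorem pyRange_shift (a b : Int) :
    PySem.List.pyRange (a + 1) (b + 1) = (PySem.List.pyRange a b).map (· + 1) := by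
  by_cases h : a < b
  · obtain ⟨d, hd⟩ : ∃ d : Nat, b = a + d := ⟨(b - a).toNat, by omega⟩
    subst hd
    clear h
    induction d generalizing a with
    | zero =>
        rw [PySem.List.pyRange_one_eq_nil (by omega), PySem.List.pyRange_one_eq_nil (by omega)]
        rfl
    | succ d ih =>
        have e1 : a + ((d : Int) + 1) = (a + d) + 1 := by ring
        push_cast [e1]
        rw [PySem.List.pyRange_one_succ_right (by omega : a + 1 ≤ a + (d : Int) + 1),
            PySem.List.pyRange_one_succ_right (by omega : a ≤ a + (d : Int)),
            List.map_append, ih a]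
        rfl
  · rw [PySem.List.pyRange_one_eq_nil (by omega), PySem.List.pyRange_one_eq_nil (by omega)]
    rfl

theorem aCell_eq (n i j : Int) (hi0 : 0 ≤ i) (hin : i < n) (hj0 : 0 ≤ j) (hjn : j < n) :
    aCell n i j = bVar n i j := by
  obtain ⟨N, rfl⟩ : ∃ N : Nat, n = (N : Int) := ⟨n.toNat, by omega⟩
  obtain ⟨ki, rfl⟩ : ∃ k : Nat, i = (k : Int) := ⟨i.toNat, by omega⟩
  obtain ⟨kj, rfl⟩ : ∃ k : Nat, j = (k : Int) := ⟨j.toNat, by omega⟩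
  have hiN : ki < N := by exact_mod_cast hin
  have hjN : kj < N := by exact_mod_cast hjn
  unfold aCell aChess
  rw [PySem.List.pyGetD_map_pyRange _ N ki _ hiN]
  have hs := pyRange_shift 0 (N : Int)
  norm_num at hs
  rw [hs, List.map_map, PySem.List.pyGetD_map_pyRange _ N kj _ hjN]
  unfold bVar
  simp only [Function.comp]
  ring

def pCl (n i j k l : Int) : List Char := bClause (bVar n i j) (bVar n k l)

def pP (n i j k : Int) : List Char :=
  (if 0 ≤ i + j - k then pCl n i j k (i + j - k) else [])
    ++ (if j + k - i < n then pCl n i j k (j + k - i) else [])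

def pN (n i j k : Int) : Int :=
  (if 0 ≤ i + j - k then 1 else 0) + (if j + k - i < n then 1 else 0)

def pParts (n i j k : Int) : List (List Char) :=
  (if 0 ≤ i + j - k then [pCl n i j k (i + j - k)] else [])
    ++ (if j + k - i < n then [pCl n i j k (j + k - i)] else [])

theorem pParts_flatten (n i j k : Int) : (pParts n i j k).flatten = pP n i j k := by
  unfold pParts pP
  split_ifs <;> simp

theorem filter_pair (m : Nat) (p : Int → Bool) (a b : Int)
    (hp : ∀ x, p x = (decide (x = a) || decide (x = b)))
    (ham : a < (m : Int)) (hb0 : 0 ≤ b) (hab : a < b) :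
    (PySem.List.pyRange 0 (m : Int)).filter p
      = (if 0 ≤ a then [a] else []) ++ (if b < (m : Int) then [b] else []) := by
  induction m with
  | zero =>
      rw [PySem.List.pyRange_one_eq_nil (by omega)]
      rw [if_neg (by omega), if_neg (by omega)]
      rfl
  | succ m ih =>
      have hcast : ((m + 1 : Nat) : Int) = (m : Int) + 1 := by push_cast; ring
      rw [hcast] at ham ⊢
      rw [PySem.List.pyRange_one_succ_right (by positivity), List.filter_append]
      by_cases hm : a = (m : Int)
      · have hflt : (PySem.List.pyRange 0 (m : Int)).filter p = [] := by
          apply List.filter_eq_nil_iff.mpr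
          intro x hx
          rw [PySem.List.mem_pyRange_one] at hx
          rw [hp x, decide_eq_false (show ¬(x = a) by omega),
              decide_eq_false (show ¬(x = b) by omega)]
          simp
        have hpm : p (m : Int) = true := by
          rw [hp, decide_eq_true (show ((m : Int) = a) by omega)]
          rfl
        rw [hflt, List.nil_append, show List.filter p [(m : Int)] = [(m : Int)] by
              simp [List.filter, hpm]]
        rw [if_pos (by omega), if_neg (by omega)]
        simp [hm]
      · rw [ih (by omega)]
        by_cases hbm : b = (m : Int)
        · have hpm : p (m : Int) = true := by
            rw [hp, decide_eq_true (show ((m : Int) = b) by omega)]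
            simp
          rw [show List.filter p [(m : Int)] = [(m : Int)] by simp [List.filter, hpm]]
          rw [if_neg (show ¬(b < (m : Int)) by omega), if_pos (show b < (m : Int) + 1 by omega)]
          simp [hbm]
        · have hpm : p (m : Int) = false := by
            rw [hp, decide_eq_false (show ¬((m : Int) = a) by omega),
                decide_eq_false (show ¬((m : Int) = b) by omega)]
            rfl
          rw [show List.filter p [(m : Int)] = [] by simp [List.filter, hpm]]
          by_cases hblt : b < (m : Int)
          · rw [if_pos hblt, if_pos (show b < (m : Int) + 1 by omega)]
            simp
          · rw [if_neg hblt, if_neg (show ¬(b < (m : Int) + 1) by omega)]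
            simp

theorem diagA (n i j k : Int) (hi0 : 0 ≤ i) (hik : i < k) (hkn : k < n)
    (hj0 : 0 ≤ j) (hjn : j < n) (st : List Char × Int) :
    (PySem.List.pyRange 0 n).foldl (fun st l =>
        if (i + j == k + l) || (i - j == k - l) then
          (st.1 ++ PySem.Int.toChars (-(aCell n i j)) ++ [' ']
                ++ PySem.Int.toChars (-(aCell n k l)) ++ [' ', '0', ' ', '\n'],
           st.2 + 1)
        else st) st
      = (st.1 ++ pP n i j k, st.2 + pN n i j k) := by
  obtain ⟨m, rfl⟩ : ∃ m : Nat, n = (m : Int) := ⟨n.toNat, by omega⟩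
  have hp : ∀ x : Int, ((i + j == k + x) || (i - j == k - x))
      = (decide (x = i + j - k) || decide (x = j + k - i)) := by
    intro x
    apply Bool.eq_iff_iff.mpr
    simp only [Bool.or_eq_true, beq_iff_eq, decide_eq_true_eq]
    omega
  rw [PySem.List.foldl_if_eq_foldl_filter (fun l => (i + j == k + l) || (i - j == k - l))
        (fun st l => (st.1 ++ PySem.Int.toChars (-(aCell (m : Int) i j)) ++ [' ']
                ++ PySem.Int.toChars (-(aCell (m : Int) k l)) ++ [' ', '0', ' ', '\n'], st.2 + 1))]
  rw [filter_pair m _ (i + j - k) (j + k - i) hp (by omega) (by omega) (by omega)]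
  have hcij : aCell (m : Int) i j = bVar (m : Int) i j := aCell_eq _ _ _ hi0 (by omega) hj0 hjn
  by_cases h1 : 0 ≤ i + j - k <;> by_cases h2 : j + k - i < (m : Int)
  · rw [if_pos h1, if_pos h2]
    have e1 : aCell (m : Int) k (i + j - k) = bVar (m : Int) k (i + j - k) :=
      aCell_eq _ _ _ (by omega) hkn (by omega) (by omega)
    have e2 : aCell (m : Int) k (j + k - i) = bVar (m : Int) k (j + k - i) :=
      aCell_eq _ _ _ (by omega) hkn (by omega) h2
    simp [List.foldl, pP, pN, pCl, bClause, hcij, e1, e2, (show k ≤ i + j by omega), h2,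
          List.append_assoc]
    omega
  · rw [if_pos h1, if_neg h2]
    have e1 : aCell (m : Int) k (i + j - k) = bVar (m : Int) k (i + j - k) :=
      aCell_eq _ _ _ (by omega) hkn (by omega) (by omega)
    simp [List.foldl, pP, pN, pCl, bClause, hcij, e1, (show k ≤ i + j by omega), h2,
          List.append_assoc]
  · rw [if_neg h1, if_pos h2]
    have e2 : aCell (m : Int) k (j + k - i) = bVar (m : Int) k (j + k - i) :=
      aCell_eq _ _ _ (by omega) hkn (by omega) h2
    simp [List.foldl, pP, pN, pCl, bClause, hcij, e2, (show ¬(k ≤ i + j) by omega), h2,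
          List.append_assoc]
  · rw [if_neg h1, if_neg h2]
    simp [pP, pN, (show ¬(k ≤ i + j) by omega), h2]

theorem diagB (n i j k : Int) (st : List (List Char) × Int) :
    (let st1 := if 0 ≤ i + j - k then
        (st.1 ++ [bClause (bVar n i j) (bVar n k (i + j - k))], st.2 + 1) else st
     if j + k - i < n then
        (st1.1 ++ [bClause (bVar n i j) (bVar n k (j + k - i))], st1.2 + 1) else st1)
      = (st.1 ++ pParts n i j k, st.2 + pN n i j k) := by
  unfold pParts pN pCl
  split_ifs with h1 h2 h2' <;> simp [List.append_assoc] <;> omega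

theorem a3k (n i j : Int) (hi0 : 0 ≤ i) (hin : i < n) (hj0 : 0 ≤ j) (hjn : j < n)
    (st : List Char × Int) :
    (PySem.List.pyRange (i + 1) n).foldl (fun st k =>
        (PySem.List.pyRange 0 n).foldl (fun st l =>
          if (i + j == k + l) || (i - j == k - l) then
            (st.1 ++ PySem.Int.toChars (-(aCell n i j)) ++ [' ']
                  ++ PySem.Int.toChars (-(aCell n k l)) ++ [' ', '0', ' ', '\n'],
             st.2 + 1)
          else st) st) st
      = (st.1 ++ (PySem.List.pyRange (i + 1) n).flatMap (fun k => pP n i j k),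
         st.2 + ((PySem.List.pyRange (i + 1) n).map (fun k => pN n i j k)).sum) := by
  rw [PySem.List.foldl_congr_mem _ _
        (fun (st : List Char × Int) k => (st.1 ++ pP n i j k, st.2 + pN n i j k)) _
        (by
          intro acc k hk
          rw [PySem.List.mem_pyRange_one] at hk
          exact diagA n i j k hi0 (by omega) (by omega) hj0 hjn acc)]
  exact foldl_pair_append_add _ _ _ _ _

theorem a3j (n i : Int) (hi0 : 0 ≤ i) (hin : i < n) (st : List Char × Int) :
    (PySem.List.pyRange 0 n).foldl (fun st j =>
      (PySem.List.pyRange (i + 1) n).foldl (fun st k =>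
        (PySem.List.pyRange 0 n).foldl (fun st l =>
          if (i + j == k + l) || (i - j == k - l) then
            (st.1 ++ PySem.Int.toChars (-(aCell n i j)) ++ [' ']
                  ++ PySem.Int.toChars (-(aCell n k l)) ++ [' ', '0', ' ', '\n'],
             st.2 + 1)
          else st) st) st) st
      = (st.1 ++ (PySem.List.pyRange 0 n).flatMap (fun j =>
            (PySem.List.pyRange (i + 1) n).flatMap (fun k => pP n i j k)),
         st.2 + ((PySem.List.pyRange 0 n).map (fun j =>
            ((PySem.List.pyRange (i + 1) n).map (fun k => pN n i j k)).sum)).sum) := by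
  rw [PySem.List.foldl_congr_mem _ _
        (fun (st : List Char × Int) j =>
          (st.1 ++ (PySem.List.pyRange (i + 1) n).flatMap (fun k => pP n i j k),
           st.2 + ((PySem.List.pyRange (i + 1) n).map (fun k => pN n i j k)).sum)) _
        (by
          intro acc j hj
          rw [PySem.List.mem_pyRange_one] at hj
          exact a3k n i j hi0 hin hj.1 hj.2 acc)]
  exact foldl_pair_append_add _ _ _ _ _

theorem a3i (n : Int) (st : List Char × Int) :
    (PySem.List.pyRange 0 n).foldl (fun st i =>
      (PySem.List.pyRange 0 n).foldl (fun st j =>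
        (PySem.List.pyRange (i + 1) n).foldl (fun st k =>
          (PySem.List.pyRange 0 n).foldl (fun st l =>
            if (i + j == k + l) || (i - j == k - l) then
              (st.1 ++ PySem.Int.toChars (-(aCell n i j)) ++ [' ']
                    ++ PySem.Int.toChars (-(aCell n k l)) ++ [' ', '0', ' ', '\n'],
               st.2 + 1)
            else st) st) st) st) st
      = (st.1 ++ (PySem.List.pyRange 0 n).flatMap (fun i =>
            (PySem.List.pyRange 0 n).flatMap (fun j =>
              (PySem.List.pyRange (i + 1) n).flatMap (fun k => pP n i j k))),
         st.2 + ((PySem.List.pyRange 0 n).map (fun i =>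
            ((PySem.List.pyRange 0 n).map (fun j =>
              ((PySem.List.pyRange (i + 1) n).map (fun k => pN n i j k)).sum)).sum)).sum) := by
  rw [PySem.List.foldl_congr_mem _ _
        (fun (st : List Char × Int) i =>
          (st.1 ++ (PySem.List.pyRange 0 n).flatMap (fun j =>
              (PySem.List.pyRange (i + 1) n).flatMap (fun k => pP n i j k)),
           st.2 + ((PySem.List.pyRange 0 n).map (fun j =>
              ((PySem.List.pyRange (i + 1) n).map (fun k => pN n i j k)).sum)).sum)) _
        (by
          intro acc i hi
          rw [PySem.List.mem_pyRange_one] at hi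
          exact a3j n i hi.1 hi.2 acc)]
  exact foldl_pair_append_add _ _ _ _ _

theorem flatten_flatMap {α β : Type} (l : List α) (G : α → List (List β)) :
    (l.flatMap G).flatten = l.flatMap (fun x => (G x).flatten) := by
  induction l with
  | nil => rfl
  | cons x xs ih => simp [List.flatMap_cons, ih]

theorem b3 (n : Int) (st0 : List (List Char) × Int) :
    bPhase3 n st0
      = (st0.1 ++ (PySem.List.pyRange 0 n).flatMap (fun i =>
            (PySem.List.pyRange 0 n).flatMap (fun j =>
              (PySem.List.pyRange (i + 1) n).flatMap (fun k => pParts n i j k))),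
         st0.2 + ((PySem.List.pyRange 0 n).map (fun i =>
            ((PySem.List.pyRange 0 n).map (fun j =>
              ((PySem.List.pyRange (i + 1) n).map (fun k => pN n i j k)).sum)).sum)).sum) := by
  unfold bPhase3
  rw [PySem.List.foldl_congr_mem _ _
        (fun (st : List (List Char) × Int) i =>
          (st.1 ++ (PySem.List.pyRange 0 n).flatMap (fun j =>
              (PySem.List.pyRange (i + 1) n).flatMap (fun k => pParts n i j k)),
           st.2 + ((PySem.List.pyRange 0 n).map (fun j =>
              ((PySem.List.pyRange (i + 1) n).map (fun k => pN n i j k)).sum)).sum)) _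
        (by
          intro acc i _
          rw [PySem.List.foldl_congr_mem _ _
                (fun (st : List (List Char) × Int) j =>
                  (st.1 ++ (PySem.List.pyRange (i + 1) n).flatMap (fun k => pParts n i j k),
                   st.2 + ((PySem.List.pyRange (i + 1) n).map (fun k => pN n i j k)).sum)) _
                (by
                  intro acc j _
                  rw [PySem.List.foldl_congr_mem _ _
                        (fun (st : List (List Char) × Int) k =>
                          (st.1 ++ pParts n i j k, st.2 + pN n i j k)) _
                        (by intro acc k _; exact diagB n i j k acc)]
                  exact foldl_pair_append_add _ _ _ _ _)]
          exact foldl_pair_append_add _ _ _ _ _)]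
  exact foldl_pair_append_add _ _ _ _ _

theorem phase3_eq (n : Int) (bs : List (List Char)) (c : Int) :
    aPhase3 n (bs.flatten, c) = ((bPhase3 n (bs, c)).1.flatten, (bPhase3 n (bs, c)).2) := by
  rw [b3]
  unfold aPhase3
  rw [a3i]
  simp only [List.flatten_append, flatten_flatMap, pParts_flatten]

def q2Parts (n k i j : Int) : List (List Char) :=
  [bClause (bVar n k i) (bVar n k j), bClause (bVar n i k) (bVar n j k)]

theorem a2j (n k i : Int) (hk0 : 0 ≤ k) (hkn : k < n) (hi0 : 0 ≤ i) (hin : i < n)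
    (st : List Char × Int) :
    (PySem.List.pyRange (i + 1) n).foldl (fun st j =>
        (st.1 ++ PySem.Int.toChars (-(aCell n k i)) ++ [' '] ++ PySem.Int.toChars (-(aCell n k j)) ++ [' ', '0', ' ', '\n']
              ++ PySem.Int.toChars (-(aCell n i k)) ++ [' '] ++ PySem.Int.toChars (-(aCell n j k)) ++ [' ', '0', ' ', '\n'],
         st.2 + 2)) st
      = (st.1 ++ (PySem.List.pyRange (i + 1) n).flatMap (fun j => (q2Parts n k i j).flatten),
         st.2 + ((PySem.List.pyRange (i + 1) n).map (fun _ => (2 : Int))).sum) := by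
  rw [PySem.List.foldl_congr_mem _ _
        (fun (st : List Char × Int) j => (st.1 ++ (q2Parts n k i j).flatten, st.2 + 2)) _
        (by
          intro acc j hj
          rw [PySem.List.mem_pyRange_one] at hj
          rw [aCell_eq n k i hk0 hkn hi0 hin, aCell_eq n k j hk0 hkn (by omega) (by omega),
              aCell_eq n i k hi0 hin hk0 hkn, aCell_eq n j k (by omega) (by omega) hk0 hkn]
          simp [q2Parts, bClause, List.append_assoc])]
  exact foldl_pair_append_add _ _ _ _ _

theorem a2 (n : Int) (st0 : List Char × Int) :
    aPhase2 n st0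
      = (st0.1 ++ (PySem.List.pyRange 0 n).flatMap (fun k =>
            (PySem.List.pyRange 0 n).flatMap (fun i =>
              (PySem.List.pyRange (i + 1) n).flatMap (fun j => (q2Parts n k i j).flatten))),
         st0.2 + ((PySem.List.pyRange 0 n).map (fun _ =>
            ((PySem.List.pyRange 0 n).map (fun i =>
              ((PySem.List.pyRange (i + 1) n).map (fun _ => (2 : Int))).sum)).sum)).sum) := by
  unfold aPhase2
  rw [PySem.List.foldl_congr_mem _ _
        (fun (st : List Char × Int) k =>
          (st.1 ++ (PySem.List.pyRange 0 n).flatMap (fun i =>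
              (PySem.List.pyRange (i + 1) n).flatMap (fun j => (q2Parts n k i j).flatten)),
           st.2 + ((PySem.List.pyRange 0 n).map (fun i =>
              ((PySem.List.pyRange (i + 1) n).map (fun _ => (2 : Int))).sum)).sum)) _
        (by
          intro acc k hk
          rw [PySem.List.mem_pyRange_one] at hk
          rw [PySem.List.foldl_congr_mem _ _
                (fun (st : List Char × Int) i =>
                  (st.1 ++ (PySem.List.pyRange (i + 1) n).flatMap (fun j => (q2Parts n k i j).flatten),
                   st.2 + ((PySem.List.pyRange (i + 1) n).map (fun _ => (2 : Int))).sum)) _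
                (by
                  intro acc i hi
                  rw [PySem.List.mem_pyRange_one] at hi
                  exact a2j n k i hk.1 hk.2 hi.1 hi.2 acc)]
          exact foldl_pair_append_add _ _ _ _ _)]
  exact foldl_pair_append_add _ _ _ _ _

theorem b2 (n : Int) (st0 : List (List Char) × Int) :
    bPhase2 n st0
      = (st0.1 ++ (PySem.List.pyRange 0 n).flatMap (fun k =>
            (PySem.List.pyRange 0 n).flatMap (fun i =>
              (PySem.List.pyRange (i + 1) n).flatMap (fun j => q2Parts n k i j))),
         st0.2 + ((PySem.List.pyRange 0 n).map (fun _ =>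
            ((PySem.List.pyRange 0 n).map (fun i =>
              ((PySem.List.pyRange (i + 1) n).map (fun _ => (2 : Int))).sum)).sum)).sum) := by
  unfold bPhase2
  rw [PySem.List.foldl_congr_mem _ _
        (fun (st : List (List Char) × Int) k =>
          (st.1 ++ (PySem.List.pyRange 0 n).flatMap (fun i =>
              (PySem.List.pyRange (i + 1) n).flatMap (fun j => q2Parts n k i j)),
           st.2 + ((PySem.List.pyRange 0 n).map (fun i =>
              ((PySem.List.pyRange (i + 1) n).map (fun _ => (2 : Int))).sum)).sum)) _
        (by
          intro acc k _
          rw [PySem.List.foldl_congr_mem _ _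
                (fun (st : List (List Char) × Int) i =>
                  (st.1 ++ (PySem.List.pyRange (i + 1) n).flatMap (fun j => q2Parts n k i j),
                   st.2 + ((PySem.List.pyRange (i + 1) n).map (fun _ => (2 : Int))).sum)) _
                (by
                  intro acc i _
                  exact foldl_pair_append_add _ (fun j => q2Parts n k i j) (fun _ => (2 : Int)) _ _)]
          exact foldl_pair_append_add _ _ _ _ _)]
  exact foldl_pair_append_add _ _ _ _ _

theorem phase2_eq (n : Int) (bs : List (List Char)) (c : Int) :
    aPhase2 n (bs.flatten, c) = ((bPhase2 n (bs, c)).1.flatten, (bPhase2 n (bs, c)).2) := by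
  rw [b2, a2]
  simp only [List.flatten_append, flatten_flatMap]

theorem shift_sep (xs : List (List Char)) :
    [' '] ++ xs.flatMap (fun y => y ++ [' ']) = xs.flatMap (fun y => [' '] ++ y) ++ [' '] := by
  induction xs with
  | nil => rfl
  | cons y ys ih =>
      simp only [List.flatMap_cons]
      rw [show [' '] ++ ((y ++ [' ']) ++ List.flatMap (fun y => y ++ [' ']) ys)
            = ([' '] ++ y) ++ ([' '] ++ List.flatMap (fun y => y ++ [' ']) ys) by simp, ih]
      simp [List.append_assoc]

theorem interc_flatMap (s x : List Char) (xs : List (List Char)) :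
    List.intercalate s (x :: xs) = x ++ (xs.flatMap (fun y => s ++ y)) := by
  induction xs generalizing x with
  | nil => simp [List.intercalate]
  | cons y ys ih =>
      simp only [List.intercalate] at *
      rw [show List.intersperse s (x :: y :: ys) = x :: s :: List.intersperse s (y :: ys) from rfl,
          List.flatten_cons, List.flatten_cons, ih y]
      simp

theorem row_join (x : List Char) (xs : List (List Char)) :
    (x :: xs).flatMap (fun y => y ++ [' ']) ++ ['0', ' ', '\n']
      = PySem.Chars.join [' '] (x :: xs) ++ [' ', '0', ' ', '\n'] := by
  show _ = List.intercalate [' '] (x :: xs) ++ _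
  rw [interc_flatMap, List.flatMap_cons]
  have := shift_sep xs
  simp only [List.append_assoc]
  rw [show [' '] ++ (List.flatMap (fun y => y ++ [' ']) xs ++ ['0', ' ', '\n'])
        = ([' '] ++ List.flatMap (fun y => y ++ [' ']) xs) ++ ['0', ' ', '\n'] by simp,
      this]
  simp [List.append_assoc]

theorem flatMap_congr_mem {α β : Type} {l : List α} {f g : α → List β}
    (h : ∀ x ∈ l, f x = g x) : l.flatMap f = l.flatMap g := by
  simp only [List.flatMap_def]
  rw [List.map_congr_left h]

theorem rowEq (n i : Int) (hi0 : 0 ≤ i) (hin : i < n) :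
    (PySem.List.pyRange 0 n).flatMap (fun j => PySem.Int.toChars (aCell n i j) ++ [' ']) ++ ['0', ' ', '\n']
      = PySem.Chars.join [' '] ((PySem.List.pyRange 0 n).map (fun j => PySem.Int.toChars (bVar n i j)))
          ++ [' ', '0', ' ', '\n'] := by
  rw [flatMap_congr_mem (g := fun j => PySem.Int.toChars (bVar n i j) ++ [' '])
        (by
          intro j hj
          rw [PySem.List.mem_pyRange_one] at hj
          rw [aCell_eq n i j hi0 hin hj.1 hj.2])]
  rw [show (PySem.List.pyRange 0 n).flatMap (fun j => PySem.Int.toChars (bVar n i j) ++ [' '])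
        = ((PySem.List.pyRange 0 n).map (fun j => PySem.Int.toChars (bVar n i j))).flatMap
            (fun y => y ++ [' ']) by rw [List.flatMap_map]]
  obtain ⟨x, xs, hxs⟩ : ∃ x xs, (PySem.List.pyRange 0 n).map (fun j => PySem.Int.toChars (bVar n i j)) = x :: xs := by
    have hne : PySem.List.pyRange 0 n ≠ [] := by
      intro hc
      have : i ∈ PySem.List.pyRange 0 n := PySem.List.mem_pyRange_one.mpr ⟨hi0, hin⟩
      rw [hc] at this
      exact absurd this (List.not_mem_nil)
    rcases hl : PySem.List.pyRange 0 n with _ | ⟨y, ys⟩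
    · exact absurd hl hne
    · exact ⟨_, _, rfl⟩
  rw [hxs]
  exact row_join x xs

theorem phase1_eq (n : Int) :
    aPhase1 n = ((bPhase1 n).1.flatten, (bPhase1 n).2) := by
  unfold aPhase1 bPhase1
  rw [PySem.List.foldl_congr_mem _ _
        (fun (st : List Char × Int) i =>
          (st.1 ++ ((PySem.List.pyRange 0 n).flatMap (fun j => PySem.Int.toChars (aCell n i j) ++ [' '])
              ++ ['0', ' ', '\n']), st.2 + 1)) _
        (by
          intro acc i _
          rw [show (fun (sat : List Char) j => sat ++ PySem.Int.toChars (aCell n i j) ++ [' '])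
                = (fun sat j => sat ++ (PySem.Int.toChars (aCell n i j) ++ [' '])) by
              funext sat j; rw [List.append_assoc],
              PySem.List.foldl_append_eq_flatMap]
          rw [List.append_assoc])]
  rw [PySem.List.foldl_congr_mem _ _
        (fun (st : List Char × Int) i =>
          (st.1 ++ (PySem.Chars.join [' '] ((PySem.List.pyRange 0 n).map (fun j => PySem.Int.toChars (bVar n i j)))
              ++ [' ', '0', ' ', '\n']), st.2 + 1)) _
        (by
          intro acc i hi
          rw [PySem.List.mem_pyRange_one] at hi
          rw [rowEq n i hi.1 hi.2])]
  rw [foldl_pair_append_add, foldl_pair_append_add (α := List Char) (cnt := fun _ => (1 : Int))]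
  simp only [List.flatten_append, flatten_flatMap]
  simp

-- ===== VERDICT (by name: the statement is the Claim_ definition above) =====
theorem nqueens_sat_spec : Claim_equal_nqueens_sat := by
  intro n _
  show nqueens_sat n = nqueens_sat_alt n
  unfold nqueens_sat nqueens_sat_alt
  rw [phase1_eq n, phase2_eq n (bPhase1 n).1 (bPhase1 n).2, Prod.mk.eta,
      phase3_eq n (bPhase2 n (bPhase1 n)).1 (bPhase2 n (bPhase1 n)).2, Prod.mk.eta]
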